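-- pv_equiv track=rewrite | github.com/olety/codingame-winter-2026 | python/bot/bot.py | legal_command_count
-- ===== SOURCE A (Python) =====
-- DIR_DELTAS = [(0, 0), (0, -1), (1, 0), (0, 1), (-1, 0)]
--
-- DIR_OPPOSITE = {1: 3, 3: 1, 2: 4, 4: 2}
--
-- def get_facing(segments: list) -> int:
--     """Determine facing direction index from body segments.
--     Returns direction index (1=N, 2=E, 3=S, 4=W) or 0 for Unset.
--     Matches Rust BirdState::facing.
--     """
--     if len(segments) < 2:
--         return 0  # Unset
--     hx, hy = segments[0]
--     nx, ny = segments[1]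
--     dx, dy = hx - nx, hy - ny
--     for i in range(1, 5):
--         if DIR_DELTAS[i] == (dx, dy):
--             return i
--     return 0  # Unset
--
-- def legal_command_count(segments: list) -> int:
--     """Count legal commands for an alive bird.
--     Matches Rust legal_commands_for_bird: KEEP + directions excluding
--     current facing and its opposite.
--     """
--     facing = get_facing(segments)
--     count = 1  # KEEP is always legal
--     for d in range(1, 5):  # N, E, S, W
--         if facing != 0 and d == DIR_OPPOSITE.get(facing, -1):
--             continue
--         if d == facing:
--             continue
--         count += 1
--     return count
-- ===== SOURCE B (Python) =====
-- def legal_command_count(segments: list) -> int: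
--     # Closed form, no facing index needed: with a known facing, exactly the
--     # facing and its opposite are excluded (2 of 4 directions), so count is
--     # KEEP + 2 = 3; otherwise all 4 directions are legal, KEEP + 4 = 5.
--     if len(segments) < 2:
--         return 5
--     (hx, hy), (nx, ny) = segments[0], segments[1]
--     return 3 if (hx - nx, hy - ny) in ((0, -1), (1, 0), (0, 1), (-1, 0)) else 5
-- ===== Notes on version B (the rewrite author's own statement) =====
-- stated objective: simpler
-- what changed: Dropped both the get_facing direction-index search and the counting loop: B tests the head-neck delta directly against the four unit steps and returns the closed form 3 (facing set: facing and its opposite excluded) or 5 (unset).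
import Mathlib
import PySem

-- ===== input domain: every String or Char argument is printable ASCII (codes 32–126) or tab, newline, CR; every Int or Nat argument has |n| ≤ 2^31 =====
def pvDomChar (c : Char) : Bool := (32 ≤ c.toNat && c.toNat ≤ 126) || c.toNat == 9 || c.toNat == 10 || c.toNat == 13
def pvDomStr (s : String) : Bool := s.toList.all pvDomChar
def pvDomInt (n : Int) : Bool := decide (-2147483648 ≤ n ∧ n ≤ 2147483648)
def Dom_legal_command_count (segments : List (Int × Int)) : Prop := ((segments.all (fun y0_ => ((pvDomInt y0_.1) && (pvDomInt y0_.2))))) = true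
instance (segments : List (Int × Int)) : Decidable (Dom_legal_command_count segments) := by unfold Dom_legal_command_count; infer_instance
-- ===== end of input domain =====

-- B replaces A's facing-index search plus counting loop by one direct test of
-- the head-neck delta against the four unit steps, returning 3 or 5 (simpler).

-- ===== PORT A =====
def DIR_DELTAS : List (Int × Int) := [(0, 0), (0, -1), (1, 0), (0, 1), (-1, 0)]

def DIR_OPPOSITE : PySem.Dict Int Int := PySem.Dict.ofList [(1, 3), (3, 1), (2, 4), (4, 2)]

-- the 'for i in range(1,5): if DIR_DELTAS[i] == (dx,dy): return i' loop of get_facing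
def facingLoop (dxy : Int × Int) : List Int → Int
  | [] => 0
  | i :: rest => if PySem.List.pyGet? DIR_DELTAS i = some dxy then i else facingLoop dxy rest

def get_facing (segments : List (Int × Int)) : Int :=
  if segments.length < 2 then 0
  else
    match segments with
    | (hx, hy) :: (nx, ny) :: _ =>
      facingLoop (hx - nx, hy - ny) (PySem.List.pyRange 1 5 1)
    | _ => 0

-- the 'for d in range(1,5)' counting loop of legal_command_count
def countLoop (facing : Int) : List Int → Int → Int
  | [], count => count
  | d :: rest, count =>
    if facing ≠ 0 ∧ d = PySem.Dict.getD DIR_OPPOSITE facing (-1) then countLoop facing rest count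
    else if d = facing then countLoop facing rest count
    else countLoop facing rest (count + 1)

def legal_command_count (segments : List (Int × Int)) : Int :=
  countLoop (get_facing segments) (PySem.List.pyRange 1 5 1) 1

-- ===== PORT B =====
def legal_command_count_alt (segments : List (Int × Int)) : Int :=
  match segments with
  | (hx, hy) :: (nx, ny) :: _ =>
    if (hx - nx, hy - ny) ∈ [((0 : Int), (-1 : Int)), (1, 0), (0, 1), (-1, 0)] then 3 else 5
  | _ => 5

-- ===== PRECONDITION & SPEC =====
def Spec_legal_command_count (segments : List (Int × Int)) (out : Int) : Prop := out = legal_command_count_alt segments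
instance (segments : List (Int × Int)) (out : Int) : Decidable (Spec_legal_command_count segments out) := by unfold Spec_legal_command_count; infer_instance

-- ===== CLAIM (what is proved, stated in full; the proofs are below) =====
def Claim_equal_legal_command_count : Prop := ∀ (segments : List (Int × Int)), Dom_legal_command_count segments → Spec_legal_command_count segments (legal_command_count segments)

-- ===== LEMMAS AND PROOFS =====

-- the facing search on an arbitrary delta, fully cased out
theorem facingLoop_eval (dxy : Int × Int) :
    facingLoop dxy (PySem.List.pyRange 1 5 1) =
      if dxy = (0, -1) then 1 else if dxy = (1, 0) then 2
      else if dxy = (0, 1) then 3 else if dxy = (-1, 0) then 4 else 0 := by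
  rw [show PySem.List.pyRange 1 5 1 = ([1, 2, 3, 4] : List Int) from by decide]
  simp only [facingLoop, DIR_DELTAS]
  norm_num [PySem.List.pyGet?, PySem.List.pyIdx?, eq_comm]
  rfl

-- the counting loop on each possible facing value
theorem countLoop_eval (f : Int) (hf : f = 0 ∨ f = 1 ∨ f = 2 ∨ f = 3 ∨ f = 4) :
    countLoop f (PySem.List.pyRange 1 5 1) 1 = if f = 0 then 5 else 3 := by
  rcases hf with h | h | h | h | h <;> subst h <;> decide

-- get_facing on bodies shorter than two segments
theorem get_facing_short (s : List (Int × Int)) (h : s.length < 2) : get_facing s = 0 := by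
  unfold get_facing
  rw [if_pos h]

-- ===== VERDICT (by name: the statement is the Claim_ definition above) =====
theorem legal_command_count_spec : Claim_equal_legal_command_count := by
  intro segments _
  unfold Spec_legal_command_count legal_command_count
  match segments with
  | [] =>
    rw [get_facing_short [] (by simp), countLoop_eval 0 (by tauto)]; decide
  | [(a, b)] =>
    rw [get_facing_short [(a, b)] (by simp), countLoop_eval 0 (by tauto)]
    simp [legal_command_count_alt]
  | (hx, hy) :: (nx, ny) :: rest =>
    have hg : get_facing ((hx, hy) :: (nx, ny) :: rest) =
        facingLoop (hx - nx, hy - ny) (PySem.List.pyRange 1 5 1) := by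
      simp [get_facing]
    rw [hg, facingLoop_eval]
    split_ifs with h1 h2 h3 h4
    · rw [countLoop_eval 1 (by tauto)]; simp [legal_command_count_alt, h1]
    · rw [countLoop_eval 2 (by tauto)]; simp [legal_command_count_alt, h2]
    · rw [countLoop_eval 3 (by tauto)]; simp [legal_command_count_alt, h3]
    · rw [countLoop_eval 4 (by tauto)]; simp [legal_command_count_alt, h4]
    · rw [countLoop_eval 0 (by tauto)]
      simp [legal_command_count_alt, h1, h2, h3, h4]
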